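-- pv_equiv track=rewrite | github.com/BismarckBamfo/ocr-paper | trdg/reverse_after_render.py | reverse_after_render
-- ===== SOURCE A (Python) =====
-- def reverse_after_render(strings):
--     '''
--     Replace the special characters in the strings with the characters that are used in the rendering
--     process.
--
--     :param strings: a list of strings to be rendered
--     :return: The strings with the special characters replaced.
--     '''
--     special_char1_small = [chr(390), chr(596), chr(7440),chr(8580)] #Character codes for small "ɔ"
--     special_char1_big = [chr(1021), chr(8579)]  #Character codes for big "ɔ"
--     special_char2_big = [chr(400)] #Character codes for big "ɛ"
--     special_char2_small = [chr(603), chr(949)]  #Character codes for small "ɛ"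
--     special_chars = special_char1_small + special_char1_big + special_char2_small + special_char2_big
--     for idx, string in enumerate(strings):
--         for _, char in enumerate(string):
--             if char == 'c':
--                 string = string.replace('c', special_char1_small[1])
--                 strings[idx] = string
--                 continue
--             if char == 'C':
--                 string = string.replace('C', special_char1_big[0])
--                 strings[idx] = string
--                 continue
--             if char == 'j':
--                 string = string.replace('j', special_char2_small[0])
--                 strings[idx] = string
--                 continue
--             if char == 'J':
--                 string = string.replace('J', special_char2_small[0])
--                 strings[idx] = string
--                 continue
--
--     return strings
-- ===== SOURCE B (Python) =====
-- def reverse_after_render(strings):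
--     '''
--     Replace the special characters in the strings with the characters that are used in the rendering
--     process.
--
--     :param strings: a list of strings to be rendered
--     :return: The strings with the special characters replaced.
--     '''
--     table = {'c': chr(596), 'C': chr(1021), 'j': chr(603), 'J': chr(603)}
--     for idx in range(len(strings)):
--         strings[idx] = ''.join(table.get(ch, ch) for ch in strings[idx])
--     return strings
-- ===== Notes on version B (the rewrite author's own statement) =====
-- stated objective: idiomatic
-- what changed: Replaces A's per-character detect-then-whole-string str.replace rescans with a single fixed lookup table ({'c','C','j','J'} -> replacement chars) and one join over each string's characters, still mutating the list in place.
import Mathlib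
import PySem

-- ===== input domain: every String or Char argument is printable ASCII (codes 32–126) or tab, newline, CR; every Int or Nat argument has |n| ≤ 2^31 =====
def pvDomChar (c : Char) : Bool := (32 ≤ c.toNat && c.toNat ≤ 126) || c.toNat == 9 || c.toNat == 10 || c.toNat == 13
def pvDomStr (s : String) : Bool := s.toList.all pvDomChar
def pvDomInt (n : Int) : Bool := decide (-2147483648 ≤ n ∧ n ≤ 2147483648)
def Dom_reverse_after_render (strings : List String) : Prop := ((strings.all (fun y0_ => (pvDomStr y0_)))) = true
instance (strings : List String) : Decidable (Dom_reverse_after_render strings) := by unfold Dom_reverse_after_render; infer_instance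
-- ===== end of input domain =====

-- B replaces A's detect-and-str.replace rescans by one table-lookup pass per string (idiomatic);
-- both Pythons mutate the input list in place — the equivalence proved here is about the RETURN value.

-- ===== PORT A =====
-- A's constant lists of replacement characters (the unused `special_chars` concatenation and the
-- unused `special_char2_big` list are omitted).
def special_char1_small : List String := ["Ɔ", "ɔ", "ᴐ", "ↄ"]
def special_char1_big : List String := ["Ͻ", "Ↄ"]
def special_char2_small : List String := ["ɛ", "ε"]

-- Python's inner loop iterates the ORIGINAL string while `string` is reassigned; `strings[idx] = string`
-- updates only the current index, so the in-place loop is a per-element map (return value).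
def reverse_after_render (strings : List String) : List String :=
  strings.map (fun s =>
    s.toList.foldl (fun cur ch =>
      if ch = 'c' then PySem.Str.replace cur "c" (special_char1_small[1]!)
      else if ch = 'C' then PySem.Str.replace cur "C" (special_char1_big[0]!)
      else if ch = 'j' then PySem.Str.replace cur "j" (special_char2_small[0]!)
      else if ch = 'J' then PySem.Str.replace cur "J" (special_char2_small[0]!)
      else cur) s)

-- ===== PORT B =====
def pvTable : PySem.Dict Char String :=
  PySem.Dict.ofList [('c', "ɔ"), ('C', "Ͻ"), ('j', "ɛ"), ('J', "ɛ")]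

-- B's `for idx in range(len(strings)): strings[idx] = ''.join(...)` as a per-element map (return value).
def reverse_after_render_alt (strings : List String) : List String :=
  strings.map (fun s =>
    PySem.Str.join "" (s.toList.map (fun ch => (pvTable.get? ch).getD (String.ofList [ch]))))

-- ===== PRECONDITION & SPEC =====
def Spec_reverse_after_render (strings : List String) (out : List String) : Prop := out = reverse_after_render_alt strings
instance (strings : List String) (out : List String) : Decidable (Spec_reverse_after_render strings out) := by unfold Spec_reverse_after_render; infer_instance

-- ===== CLAIM (what is proved, stated in full; the proofs are below) =====
def Claim_equal_reverse_after_render : Prop := ∀ (strings : List String), Dom_reverse_after_render strings → Spec_reverse_after_render strings (reverse_after_render strings)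

-- ===== LEMMAS AND PROOFS =====

-- single-character substitution
def sub (a b x : Char) : Char := if x = a then b else x

-- the per-character substitution both programs implement
def pvF (x : Char) : Char :=
  if x = 'c' then 'ɔ' else if x = 'C' then 'Ͻ' else if x = 'j' then 'ɛ' else if x = 'J' then 'ɛ' else x

-- the substitution A applies when it sees character ch
def pvSigma (ch : Char) : Char → Char :=
  if ch = 'c' then sub 'c' 'ɔ' else if ch = 'C' then sub 'C' 'Ͻ'
  else if ch = 'j' then sub 'j' 'ɛ' else if ch = 'J' then sub 'J' 'ɛ' else id

-- composed substitution after scanning the characters of l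
def pvPhi (l : List Char) (y : Char) : Char := l.foldl (fun y ch => pvSigma ch y) y

def pvIsTgt (y : Char) : Bool := y = 'c' ∨ y = 'C' ∨ y = 'j' ∨ y = 'J'

theorem replace_go_single (a b : Char) : ∀ (fuel : Nat) (l acc : List Char), l.length ≤ fuel →
    PySem.Chars.replace.go [a] [b] fuel l acc = acc.reverse ++ l.map (sub a b) := by
  intro fuel
  induction fuel with
  | zero =>
    intro l acc h
    cases l with
    | nil => simp [PySem.Chars.replace.go]
    | cons c t => simp at h
  | succ n ih =>
    intro l acc h
    cases l with
    | nil => simp [PySem.Chars.replace.go]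
    | cons c t =>
      have ht : t.length ≤ n := by simpa using h
      simp only [PySem.Chars.replace.go, List.isPrefixOf, Bool.and_true]
      by_cases hc : a = c
      · subst hc
        simp only [beq_self_eq_true, List.length_cons, List.length_nil,
          List.drop_succ_cons, List.drop_zero, List.reverse_cons, List.reverse_nil]
        rw [ih t _ ht]
        simp [sub]
      · rw [if_neg (by simp [hc]), ih t _ ht]
        simp [sub, Ne.symm hc]

theorem replace_single (l : List Char) (a b : Char) :
    PySem.Chars.replace l [a] [b] = l.map (sub a b) := by
  simp only [PySem.Chars.replace, List.isEmpty_cons, Bool.false_eq_true, if_false]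
  rw [replace_go_single a b l.length l [] le_rfl]
  simp

-- A's loop step, on the character-list side, is a map by pvSigma ch
theorem stepA_toList (cur : String) (ch : Char) :
    ((if ch = 'c' then PySem.Str.replace cur "c" (special_char1_small[1]!)
      else if ch = 'C' then PySem.Str.replace cur "C" (special_char1_big[0]!)
      else if ch = 'j' then PySem.Str.replace cur "j" (special_char2_small[0]!)
      else if ch = 'J' then PySem.Str.replace cur "J" (special_char2_small[0]!)
      else cur) : String).toList = cur.toList.map (pvSigma ch) := by
  unfold pvSigma
  split_ifs with h1 h2 h3 h4 <;>
    simp [PySem.Str.toList_replace, special_char1_small, special_char1_big, special_char2_small,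
      replace_single]

-- A's whole inner loop, on the character-list side
theorem foldA_toList (rest : List Char) : ∀ (cur : String),
    (rest.foldl (fun cur ch =>
      if ch = 'c' then PySem.Str.replace cur "c" (special_char1_small[1]!)
      else if ch = 'C' then PySem.Str.replace cur "C" (special_char1_big[0]!)
      else if ch = 'j' then PySem.Str.replace cur "j" (special_char2_small[0]!)
      else if ch = 'J' then PySem.Str.replace cur "J" (special_char2_small[0]!)
      else cur) cur).toList
      = rest.foldl (fun l ch => l.map (pvSigma ch)) cur.toList := by
  induction rest with
  | nil => intro cur; rfl
  | cons ch t ih => intro cur; rw [List.foldl_cons, List.foldl_cons, ih, stepA_toList]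

-- folding maps composes into pvPhi
theorem fold_map_phi (rest : List Char) : ∀ (s : List Char) (h : Char → Char),
    rest.foldl (fun l ch => l.map (pvSigma ch)) (s.map h) = s.map (fun x => pvPhi rest (h x)) := by
  induction rest with
  | nil => intro s h; simp [pvPhi]
  | cons ch t ih =>
    intro s h
    simp only [List.foldl_cons, List.map_map]
    rw [ih s (pvSigma ch ∘ h)]
    rfl

theorem sigma_nontgt (ch y : Char) (hy : pvIsTgt y = false) : pvSigma ch y = y := by
  unfold pvSigma sub
  simp only [pvIsTgt, decide_eq_false_iff_not, not_or] at hy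
  split_ifs with h1 h2 h3 h4 <;> simp [hy.1, hy.2.1, hy.2.2.1, hy.2.2.2]

theorem phi_nontgt (l : List Char) : ∀ (y : Char), pvIsTgt y = false → pvPhi l y = y := by
  induction l with
  | nil => intro y _; rfl
  | cons ch t ih =>
    intro y hy
    show pvPhi t (pvSigma ch y) = y
    rw [sigma_nontgt ch y hy, ih y hy]

theorem f_nontgt (x : Char) : pvIsTgt (pvF x) = false := by
  unfold pvF pvIsTgt
  split_ifs with h1 h2 h3 h4 <;> simp_all

theorem sigma_cases (ch x : Char) : pvSigma ch x = x ∨ (x = ch ∧ pvSigma ch x = pvF x) := by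
  unfold pvSigma sub pvF
  by_cases h1 : ch = 'c' <;> by_cases h2 : ch = 'C' <;> by_cases h3 : ch = 'j' <;>
    by_cases h4 : ch = 'J' <;> by_cases hx1 : x = ch <;> simp_all

theorem sigma_self (x : Char) : pvSigma x x = pvF x := by
  unfold pvSigma sub pvF
  split_ifs with h1 h2 h3 h4 <;> simp_all

theorem phi_mem (l : List Char) : ∀ (x : Char), x ∈ l → pvPhi l x = pvF x := by
  induction l with
  | nil => intro x hx; simp at hx
  | cons ch t ih =>
    intro x hx
    show pvPhi t (pvSigma ch x) = pvF x
    rcases List.mem_cons.mp hx with hh | hmem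
    · subst hh
      rw [sigma_self, phi_nontgt t _ (f_nontgt x)]
    · rcases sigma_cases ch x with he | ⟨_, he⟩
      · rw [he, ih x hmem]
      · rw [he, phi_nontgt t _ (f_nontgt x)]

-- B's table lookup is pvF, character by character
theorem table_piece (ch : Char) :
    ((pvTable.get? ch).getD (String.ofList [ch])).toList = [pvF ch] := by
  unfold pvF
  by_cases h1 : ch = 'c'
  · subst h1; decide
  by_cases h2 : ch = 'C'
  · subst h2; decide
  by_cases h3 : ch = 'j'
  · subst h3; decide
  by_cases h4 : ch = 'J'
  · subst h4; decide
  have hT : pvTable = PySem.Dict.mk [('c', "\u0254"), ('C', "\u03fd"), ('j', "\u025b"), ('J', "\u025b")] := by decide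
  have : pvTable.get? ch = none := by
    rw [hT]
    simp [Ne.symm h1, Ne.symm h2, Ne.symm h3, Ne.symm h4, PySem.Dict.get?]
  simp [this, h1, h2, h3, h4, String.toList_ofList]

theorem elem_eq (s : String) :
    (s.toList.foldl (fun cur ch =>
      if ch = 'c' then PySem.Str.replace cur "c" (special_char1_small[1]!)
      else if ch = 'C' then PySem.Str.replace cur "C" (special_char1_big[0]!)
      else if ch = 'j' then PySem.Str.replace cur "j" (special_char2_small[0]!)
      else if ch = 'J' then PySem.Str.replace cur "J" (special_char2_small[0]!)
      else cur) s)
    = PySem.Str.join "" (s.toList.map (fun ch => (pvTable.get? ch).getD (String.ofList [ch]))) := by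
  apply String.toList_injective
  rw [foldA_toList, PySem.Str.toList_join]
  have hA : s.toList.foldl (fun l ch => l.map (pvSigma ch)) s.toList
      = s.toList.map pvF := by
    have := fold_map_phi s.toList s.toList id
    simp only [List.map_id] at this
    rw [this]
    exact List.map_congr_left (fun x hx => phi_mem s.toList x hx)
  rw [hA]
  have hB : (s.toList.map (fun ch => (pvTable.get? ch).getD (String.ofList [ch]))).map String.toList
      = (s.toList.map pvF).map (fun c => [c]) := by
    simp only [List.map_map]
    exact List.map_congr_left (fun x _ => table_piece x)
  simp only [List.map_map] at hB ⊢
  rw [show ("".toList : List Char) = [] from rfl, hB]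
  rw [← List.map_map]
  exact (PySem.Chars.join_nil_singletons _).symm

-- ===== VERDICT (by name: the statement is the Claim_ definition above) =====
theorem reverse_after_render_spec : Claim_equal_reverse_after_render := by
  intro strings _
  unfold Spec_reverse_after_render reverse_after_render reverse_after_render_alt
  exact List.map_congr_left (fun s _ => elem_eq s)
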